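-- pv_equiv track=rewrite | github.com/KainAber/lopper | lopper/app.py | get_hidden_nodes
-- ===== SOURCE A (Python) =====
-- def get_hidden_nodes(children_map: dict[int, list[int]], collapsed_nodes: set[int]) -> set[int]:
--     hidden: set[int] = set()
--     for node_id in collapsed_nodes:
--         stack = list(children_map.get(node_id, []))
--         while stack:
--             current = stack.pop()
--             if current in hidden:
--                 continue
--             hidden.add(current)
--             stack.extend(children_map.get(current, []))
--     return hidden
-- ===== SOURCE B (Python) =====
-- # B: recursive depth-first visit using the call stack instead of A's explicit stack loop.
-- # Children are visited in reverse so the recursion enumerates nodes in the same order as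
-- # A's stack pops (immaterial for the returned set itself).
-- def get_hidden_nodes(children_map: dict[int, list[int]], collapsed_nodes: set[int]) -> set[int]:
--     hidden: set[int] = set()
--
--     def visit(node: int) -> None:
--         for child in reversed(children_map.get(node, [])):
--             if child not in hidden:
--                 hidden.add(child)
--                 visit(child)
--
--     for node_id in collapsed_nodes:
--         visit(node_id)
--     return hidden
-- ===== Notes on version B (the rewrite author's own statement) =====
-- stated objective: alternative
-- what changed: A's explicit worklist stack with a pop/extend loop is replaced by a recursive depth-first visit helper that uses the call stack and checks the hidden set before descending.
import Mathlib
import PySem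

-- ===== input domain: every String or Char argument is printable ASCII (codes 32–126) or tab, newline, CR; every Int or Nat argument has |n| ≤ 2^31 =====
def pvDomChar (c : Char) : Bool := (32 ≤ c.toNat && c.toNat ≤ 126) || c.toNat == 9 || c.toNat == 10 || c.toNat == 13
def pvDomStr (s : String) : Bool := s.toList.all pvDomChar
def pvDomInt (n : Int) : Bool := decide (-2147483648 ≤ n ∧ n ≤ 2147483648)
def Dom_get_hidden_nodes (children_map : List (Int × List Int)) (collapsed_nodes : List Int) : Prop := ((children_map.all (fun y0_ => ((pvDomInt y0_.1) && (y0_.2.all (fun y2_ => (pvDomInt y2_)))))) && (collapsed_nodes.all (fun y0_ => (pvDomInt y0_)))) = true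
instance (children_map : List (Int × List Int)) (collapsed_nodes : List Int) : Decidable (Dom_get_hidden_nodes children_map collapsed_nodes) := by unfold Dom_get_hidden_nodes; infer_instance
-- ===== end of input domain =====

-- B replaces A's explicit worklist-stack loop by a recursive depth-first visit helper
-- (same reachable-set computation, a different decomposition; no speed claim).


-- ===== PORT A =====
-- children_map.get(k, []): first-match association-list lookup (Python's dict.get with
-- default []; shared by both ports, as both Pythons call the same builtin)
def pvGet (cm : List (Int × List Int)) (k : Int) : List Int :=
  match cm with
  | [] => []
  | (k', v) :: rest => if k' == k then v else pvGet rest k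
def pvU (cm : List (Int × List Int)) : List Int := (cm.map Prod.snd).flatten
lemma pvGet_subset (cm : List (Int × List Int)) (k : Int) :
    ∀ x ∈ pvGet cm k, x ∈ pvU cm := by
  induction cm with
  | nil => simp [pvGet]
  | cons p rest ih =>
    obtain ⟨k', v⟩ := p
    intro x hx
    simp only [pvGet] at hx
    simp only [pvU, List.map_cons, List.flatten_cons, List.mem_append]
    by_cases h : (k' == k) = true
    · rw [if_pos h] at hx; exact Or.inl hx
    · rw [if_neg h] at hx; exact Or.inr (ih x hx)
lemma pvGet_length (cm : List (Int × List Int)) (k : Int) :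
    (pvGet cm k).length ≤ (pvU cm).length := by
  induction cm with
  | nil => simp [pvGet]
  | cons p rest ih =>
    obtain ⟨k', v⟩ := p
    simp only [pvGet, pvU, List.map_cons, List.flatten_cons, List.length_append]
    by_cases h : (k' == k) = true
    · rw [if_pos h]; omega
    · rw [if_neg h]; simp only [pvU] at ih; omega
def pvMeasA (cm : List (Int × List Int)) (s h : List Int) : Nat :=
  ((pvU cm ++ s).toFinset \ h.toFinset).card * ((pvU cm).length + 1) + s.length
lemma pvMeasA_skip (cm : List (Int × List Int)) (s h : List Int) (hs : s ≠ []) :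
    pvMeasA cm s.dropLast h < pvMeasA cm s h := by
  have hsub : (pvU cm ++ s.dropLast).toFinset \ h.toFinset ⊆ (pvU cm ++ s).toFinset \ h.toFinset := by
    intro y hy
    rw [Finset.mem_sdiff] at hy ⊢
    refine ⟨?_, hy.2⟩
    have h1 := List.mem_toFinset.mp hy.1
    rw [List.mem_append] at h1
    exact List.mem_toFinset.mpr (List.mem_append.mpr (h1.imp id (fun h2 => (List.dropLast_sublist s).subset h2)))
  have hc := Finset.card_le_card hsub
  have hm := Nat.mul_le_mul_right ((pvU cm).length + 1) hc
  have hl : s.dropLast.length < s.length := by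
    have := List.length_pos_iff.mpr hs
    simp only [List.length_dropLast]; omega
  unfold pvMeasA; omega
lemma pvMeasA_add (cm : List (Int × List Int)) (s h : List Int) (hs : s ≠ [])
    (hc : PySem.Set.contains h (s.getLast hs) = false) :
    pvMeasA cm (s.dropLast ++ pvGet cm (s.getLast hs)) (PySem.Set.add h (s.getLast hs)) <
      pvMeasA cm s h := by
  set x := s.getLast hs with hxdef
  have hxh : x ∉ h := by
    intro hmem
    have h2 : PySem.Set.contains h x = true := by simp [PySem.Set.contains, hmem]
    rw [hc] at h2; exact absurd h2 (by simp)
  have hadd : PySem.Set.add h x = h ++ [x] := by simp [PySem.Set.add, hxh]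
  rw [hadd]
  have hxold : x ∈ (pvU cm ++ s).toFinset \ h.toFinset := by
    rw [Finset.mem_sdiff, List.mem_toFinset, List.mem_toFinset, List.mem_append]
    exact ⟨Or.inr (List.getLast_mem hs), hxh⟩
  have hsub : (pvU cm ++ (s.dropLast ++ pvGet cm x)).toFinset \ (h ++ [x]).toFinset ⊆
      ((pvU cm ++ s).toFinset \ h.toFinset).erase x := by
    intro y hy
    rw [Finset.mem_sdiff, List.mem_toFinset, List.mem_toFinset, List.mem_append, List.mem_append] at hy
    obtain ⟨hy1, hy2⟩ := hy
    rw [List.mem_append, List.mem_singleton, not_or] at hy2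
    rw [Finset.mem_erase, Finset.mem_sdiff, List.mem_toFinset, List.mem_toFinset, List.mem_append]
    refine ⟨hy2.2, ?_, hy2.1⟩
    rcases hy1 with h1 | h1
    · exact Or.inl h1
    · rcases h1 with h1 | h1
      · exact Or.inr ((List.dropLast_sublist s).subset h1)
      · exact Or.inl (pvGet_subset cm x y h1)
  have hcard : ((pvU cm ++ (s.dropLast ++ pvGet cm x)).toFinset \ (h ++ [x]).toFinset).card + 1 ≤
      ((pvU cm ++ s).toFinset \ h.toFinset).card := by
    have h1 := Finset.card_le_card hsub
    have h2 := Finset.card_erase_of_mem hxold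
    have h3 := Finset.card_pos.mpr ⟨x, hxold⟩
    omega
  have hm := Nat.mul_le_mul_right ((pvU cm).length + 1) hcard
  rw [Nat.succ_mul] at hm
  have hl1 : s.dropLast.length + 1 = s.length := by
    have := List.length_pos_iff.mpr hs
    simp only [List.length_dropLast]; omega
  have hl2 := pvGet_length cm x
  unfold pvMeasA
  simp only [List.length_append]
  omega
def pvLoopA (cm : List (Int × List Int)) (stack hidden : List Int) : List Int :=
  if hs : stack = [] then hidden
  else if PySem.Set.contains hidden (stack.getLast hs) then
    pvLoopA cm stack.dropLast hidden
  else
    pvLoopA cm (stack.dropLast ++ pvGet cm (stack.getLast hs))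
      (PySem.Set.add hidden (stack.getLast hs))
termination_by pvMeasA cm stack hidden
decreasing_by
  · exact pvMeasA_skip cm stack hidden hs
  · rename_i hcc
    exact pvMeasA_add cm stack hidden hs (by simpa using hcc)

def get_hidden_nodes (children_map : List (Int × List Int)) (collapsed_nodes : List Int) : List Int :=
  collapsed_nodes.foldl
    (fun hidden node_id => pvLoopA children_map (pvGet children_map node_id) hidden)
    PySem.Set.empty

-- ===== PORT B =====
-- The recursion visit/go returns the grown hidden set together with the (termination-only)
-- fact that it contains the hidden set it was given; the ports use only the .val component.
lemma pvMem_add {h : List Int} {c x : Int} (hx : x ∈ h) : x ∈ PySem.Set.add h c := by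
  unfold PySem.Set.add
  split_ifs <;> simp [hx]
lemma pvMemSelf_add (h : List Int) (c : Int) : c ∈ PySem.Set.add h c := by
  unfold PySem.Set.add
  split_ifs with hm
  · simpa [PySem.Set.contains] using hm
  · simp
lemma pvMeasB_visit_go (cm : List (Int × List Int)) (n : Int) (h : List Int) :
    ((pvU cm ++ (pvGet cm n).reverse).toFinset \ h.toFinset).card * ((pvU cm).length + 2) +
      (pvGet cm n).reverse.length <
    ((pvU cm ++ [n]).toFinset \ h.toFinset).card * ((pvU cm).length + 2) + ((pvU cm).length + 1) := by
  have hsub : (pvU cm ++ (pvGet cm n).reverse).toFinset \ h.toFinset ⊆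
      (pvU cm ++ [n]).toFinset \ h.toFinset := by
    intro y hy
    rw [Finset.mem_sdiff, List.mem_toFinset, List.mem_append, List.mem_reverse] at hy
    rw [Finset.mem_sdiff, List.mem_toFinset, List.mem_append]
    refine ⟨?_, hy.2⟩
    rcases hy.1 with h1 | h1
    · exact Or.inl h1
    · exact Or.inl (pvGet_subset cm n y h1)
  have hm := Nat.mul_le_mul_right ((pvU cm).length + 2) (Finset.card_le_card hsub)
  have hl : (pvGet cm n).reverse.length ≤ (pvU cm).length := by
    rw [List.length_reverse]; exact pvGet_length cm n
  omega
lemma pvMeasB_go_skip (cm : List (Int × List Int)) (c : Int) (cs h : List Int) :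
    ((pvU cm ++ cs).toFinset \ h.toFinset).card * ((pvU cm).length + 2) + cs.length <
    ((pvU cm ++ (c :: cs)).toFinset \ h.toFinset).card * ((pvU cm).length + 2) + (c :: cs).length := by
  have hsub : (pvU cm ++ cs).toFinset \ h.toFinset ⊆ (pvU cm ++ (c :: cs)).toFinset \ h.toFinset := by
    intro y hy
    rw [Finset.mem_sdiff, List.mem_toFinset, List.mem_append] at hy
    rw [Finset.mem_sdiff, List.mem_toFinset, List.mem_append, List.mem_cons]
    exact ⟨hy.1.imp id Or.inr, hy.2⟩
  have hm := Nat.mul_le_mul_right ((pvU cm).length + 2) (Finset.card_le_card hsub)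
  simp only [List.length_cons]
  omega
lemma pvMeasB_go_visit (cm : List (Int × List Int)) (c : Int) (cs h : List Int)
    (hc : PySem.Set.contains h c = false) :
    ((pvU cm ++ [c]).toFinset \ (PySem.Set.add h c).toFinset).card * ((pvU cm).length + 2) +
      ((pvU cm).length + 1) <
    ((pvU cm ++ (c :: cs)).toFinset \ h.toFinset).card * ((pvU cm).length + 2) + (c :: cs).length := by
  have hch : c ∉ h := by
    intro hmem
    have h2 : PySem.Set.contains h c = true := by simp [PySem.Set.contains, hmem]
    rw [hc] at h2; exact absurd h2 (by simp)
  have hcold : c ∈ (pvU cm ++ (c :: cs)).toFinset \ h.toFinset := by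
    rw [Finset.mem_sdiff, List.mem_toFinset, List.mem_toFinset, List.mem_append, List.mem_cons]
    exact ⟨Or.inr (Or.inl rfl), hch⟩
  have hsub : (pvU cm ++ [c]).toFinset \ (PySem.Set.add h c).toFinset ⊆
      ((pvU cm ++ (c :: cs)).toFinset \ h.toFinset).erase c := by
    intro y hy
    rw [Finset.mem_sdiff, List.mem_toFinset, List.mem_toFinset, List.mem_append] at hy
    obtain ⟨hy1, hy2⟩ := hy
    have hyc : y ≠ c := fun he => hy2 (he ▸ pvMemSelf_add h c)
    have hyh : y ∉ h := fun hm => hy2 (pvMem_add hm)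
    rw [Finset.mem_erase, Finset.mem_sdiff, List.mem_toFinset, List.mem_toFinset,
      List.mem_append, List.mem_cons]
    refine ⟨hyc, ?_, hyh⟩
    rcases hy1 with h1 | h1
    · exact Or.inl h1
    · rw [List.mem_singleton] at h1; exact Or.inr (Or.inl h1)
  have h1 := Finset.card_le_card hsub
  have h2 := Finset.card_erase_of_mem hcold
  have h3 := Finset.card_pos.mpr ⟨c, hcold⟩
  have hm := Nat.mul_le_mul_right ((pvU cm).length + 2)
    (show ((pvU cm ++ [c]).toFinset \ (PySem.Set.add h c).toFinset).card + 1 ≤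
      ((pvU cm ++ (c :: cs)).toFinset \ h.toFinset).card by omega)
  rw [Nat.succ_mul] at hm
  simp only [List.length_cons]
  omega
lemma pvMeasB_go_go (cm : List (Int × List Int)) (c : Int) (cs h h' : List Int)
    (hc : PySem.Set.contains h c = false) (hp : ∀ x ∈ PySem.Set.add h c, x ∈ h') :
    ((pvU cm ++ cs).toFinset \ h'.toFinset).card * ((pvU cm).length + 2) + cs.length <
    ((pvU cm ++ (c :: cs)).toFinset \ h.toFinset).card * ((pvU cm).length + 2) + (c :: cs).length := by
  have hch : c ∉ h := by
    intro hmem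
    have h2 : PySem.Set.contains h c = true := by simp [PySem.Set.contains, hmem]
    rw [hc] at h2; exact absurd h2 (by simp)
  have hcold : c ∈ (pvU cm ++ (c :: cs)).toFinset \ h.toFinset := by
    rw [Finset.mem_sdiff, List.mem_toFinset, List.mem_toFinset, List.mem_append, List.mem_cons]
    exact ⟨Or.inr (Or.inl rfl), hch⟩
  have hsub : (pvU cm ++ cs).toFinset \ h'.toFinset ⊆
      ((pvU cm ++ (c :: cs)).toFinset \ h.toFinset).erase c := by
    intro y hy
    rw [Finset.mem_sdiff, List.mem_toFinset, List.mem_toFinset, List.mem_append] at hy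
    obtain ⟨hy1, hy2⟩ := hy
    have hyc : y ≠ c := fun he => hy2 (by rw [he]; exact hp c (pvMemSelf_add h c))
    have hyh : y ∉ h := fun hm => hy2 (hp y (pvMem_add hm))
    rw [Finset.mem_erase, Finset.mem_sdiff, List.mem_toFinset, List.mem_toFinset,
      List.mem_append, List.mem_cons]
    exact ⟨hyc, hy1.imp id (fun h1 => Or.inr h1), hyh⟩
  have h1 := Finset.card_le_card hsub
  have h2 := Finset.card_erase_of_mem hcold
  have h3 := Finset.card_pos.mpr ⟨c, hcold⟩
  have hm := Nat.mul_le_mul_right ((pvU cm).length + 2)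
    (show ((pvU cm ++ cs).toFinset \ h'.toFinset).card + 1 ≤
      ((pvU cm ++ (c :: cs)).toFinset \ h.toFinset).card by omega)
  rw [Nat.succ_mul] at hm
  simp only [List.length_cons]
  omega
mutual
def pvVisitAux (cm : List (Int × List Int)) (node : Int) (hidden : List Int) :
    {h' : List Int // ∀ x ∈ hidden, x ∈ h'} :=
  pvGoAux cm (pvGet cm node).reverse hidden
termination_by ((pvU cm ++ [node]).toFinset \ hidden.toFinset).card * ((pvU cm).length + 2) + ((pvU cm).length + 1)
decreasing_by exact pvMeasB_visit_go cm node hidden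
def pvGoAux (cm : List (Int × List Int)) (cs : List Int) (hidden : List Int) :
    {h' : List Int // ∀ x ∈ hidden, x ∈ h'} :=
  match cs with
  | [] => ⟨hidden, fun _ hx => hx⟩
  | c :: rest =>
    if PySem.Set.contains hidden c then pvGoAux cm rest hidden
    else
      match pvVisitAux cm c (PySem.Set.add hidden c) with
      | ⟨h', hp⟩ =>
        match pvGoAux cm rest h' with
        | ⟨h'', hq⟩ => ⟨h'', fun x hx => hq x (hp x (pvMem_add hx))⟩
termination_by ((pvU cm ++ cs).toFinset \ hidden.toFinset).card * ((pvU cm).length + 2) + cs.length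
decreasing_by
  · exact pvMeasB_go_skip cm c rest hidden
  · rename_i hcc
    exact pvMeasB_go_visit cm c rest hidden (by simpa using hcc)
  · rename_i hcc
    exact pvMeasB_go_go cm c rest hidden h' (by simpa using hcc) hp
end

-- visit(node), value component
def pvVisit (cm : List (Int × List Int)) (node : Int) (hidden : List Int) : List Int :=
  (pvVisitAux cm node hidden).val

def get_hidden_nodes_alt (children_map : List (Int × List Int)) (collapsed_nodes : List Int) : List Int :=
  collapsed_nodes.foldl (fun hidden node_id => pvVisit children_map node_id hidden) PySem.Set.empty

-- ===== PRECONDITION & SPEC =====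
def Spec_get_hidden_nodes (children_map : List (Int × List Int)) (collapsed_nodes : List Int) (out : List Int) : Prop := out = get_hidden_nodes_alt children_map collapsed_nodes
instance (children_map : List (Int × List Int)) (collapsed_nodes : List Int) (out : List Int) : Decidable (Spec_get_hidden_nodes children_map collapsed_nodes out) := by unfold Spec_get_hidden_nodes; infer_instance

-- ===== CLAIM (what is proved, stated in full; the proofs are below) =====
def Claim_equal_get_hidden_nodes : Prop := ∀ (children_map : List (Int × List Int)) (collapsed_nodes : List Int), Dom_get_hidden_nodes children_map collapsed_nodes → Spec_get_hidden_nodes children_map collapsed_nodes (get_hidden_nodes children_map collapsed_nodes)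

-- ===== LEMMAS AND PROOFS =====
lemma pvGoAux_nil (cm : List (Int × List Int)) (h : List Int) : (pvGoAux cm [] h).val = h := by
  rw [pvGoAux]

lemma pvGoAux_cons (cm : List (Int × List Int)) (c : Int) (cs h : List Int) :
    (pvGoAux cm (c :: cs) h).val =
      if PySem.Set.contains h c then (pvGoAux cm cs h).val
      else (pvGoAux cm cs (pvVisitAux cm c (PySem.Set.add h c)).val).val := by
  rw [pvGoAux]
  split_ifs with h1 <;> simp

lemma pvVisitAux_eq (cm : List (Int × List Int)) (n : Int) (h : List Int) :
    (pvVisitAux cm n h).val = (pvGoAux cm (pvGet cm n).reverse h).val := by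
  rw [pvVisitAux]

lemma pvGoAux_append (cm : List (Int × List Int)) (l1 l2 h : List Int) :
    (pvGoAux cm (l1 ++ l2) h).val = (pvGoAux cm l2 (pvGoAux cm l1 h).val).val := by
  induction l1 generalizing h with
  | nil => rw [List.nil_append, pvGoAux_nil]
  | cons c cs ih =>
    rw [List.cons_append, pvGoAux_cons, pvGoAux_cons]
    cases hcb : PySem.Set.contains h c with
    | true => rw [if_pos rfl, if_pos rfl]; exact ih _
    | false => rw [if_neg (by simp), if_neg (by simp)]; exact ih _

lemma pvLoopA_eq_pvGoAux (cm : List (Int × List Int)) :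
    ∀ (n : Nat) (s h : List Int), pvMeasA cm s h ≤ n →
      pvLoopA cm s h = (pvGoAux cm s.reverse h).val := by
  intro n
  induction n with
  | zero =>
    intro s h hle
    have hs : s = [] := by
      unfold pvMeasA at hle
      have : s.length = 0 := by omega
      exact List.length_eq_zero_iff.mp this
    subst hs
    rw [pvLoopA]
    simp [pvGoAux_nil]
  | succ n ih =>
    intro s h hle
    by_cases hs : s = []
    · subst hs; rw [pvLoopA]; simp [pvGoAux_nil]
    · have hrev : s.reverse = s.getLast hs :: s.dropLast.reverse := by
        conv_lhs => rw [← List.dropLast_append_getLast hs]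
        simp
      rw [pvLoopA, dif_neg hs, hrev, pvGoAux_cons]
      cases hcb : PySem.Set.contains h (s.getLast hs) with
      | true =>
        rw [if_pos rfl, if_pos rfl]
        have hlt := pvMeasA_skip cm s h hs
        exact ih s.dropLast h (by omega)
      | false =>
        rw [if_neg (by simp), if_neg (by simp)]
        rw [pvVisitAux_eq, ← pvGoAux_append, ← List.reverse_append]
        have hlt := pvMeasA_add cm s h hs hcb
        exact ih (s.dropLast ++ pvGet cm (s.getLast hs)) (PySem.Set.add h (s.getLast hs))
          (by omega)

lemma pvLoopA_eq_pvVisit (cm : List (Int × List Int)) (n : Int) (h : List Int) :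
    pvLoopA cm (pvGet cm n) h = pvVisit cm n h := by
  unfold pvVisit
  rw [pvVisitAux_eq]
  exact pvLoopA_eq_pvGoAux cm (pvMeasA cm (pvGet cm n) h) (pvGet cm n) h le_rfl

-- ===== VERDICT (by name: the statement is the Claim_ definition above) =====
theorem get_hidden_nodes_spec : Claim_equal_get_hidden_nodes := by
  intro cm col _
  unfold Spec_get_hidden_nodes get_hidden_nodes get_hidden_nodes_alt
  have hf : (fun (hidden : List Int) (node_id : Int) => pvLoopA cm (pvGet cm node_id) hidden) =
      (fun (hidden : List Int) (node_id : Int) => pvVisit cm node_id hidden) := by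
    funext h n
    exact pvLoopA_eq_pvVisit cm n h
  rw [hf]
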